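-- pv_equiv track=rewrite | github.com/fargoDeveloper/firstProject | serviceApp/words_handler.py | longest_sentence_by_words
-- ===== SOURCE A (Python) =====
-- def longest_sentence_by_words(data_list):
--     dict_words = {}
--     dict_result = {}
--
--     for line in data_list:
--         line_list = line.split(" ")
--         dict_words[line] = len(line_list)
--
--     for unit in dict_words:
--         if dict_words[unit] == dict_words[max(dict_words, key=dict_words.get)]:
--             dict_result[unit] = dict_words[max(dict_words, key=dict_words.get)]
--     return dict_result
-- ===== SOURCE B (Python) =====
-- def longest_sentence_by_words(data_list):
--     dict_result = {}
--     if data_list: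
--         max_words = max(len(line.split(" ")) for line in data_list)
--         for line in data_list:
--             if len(line.split(" ")) == max_words:
--                 dict_result[line] = max_words
--     return dict_result
-- ===== Notes on version B (the rewrite author's own statement) =====
-- stated objective: faster
-- what changed: B computes the maximum word count once and collects matching lines in a single pass, instead of A's re-evaluation of max(dict, key=get) inside the loop over all keys.
import Mathlib
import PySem

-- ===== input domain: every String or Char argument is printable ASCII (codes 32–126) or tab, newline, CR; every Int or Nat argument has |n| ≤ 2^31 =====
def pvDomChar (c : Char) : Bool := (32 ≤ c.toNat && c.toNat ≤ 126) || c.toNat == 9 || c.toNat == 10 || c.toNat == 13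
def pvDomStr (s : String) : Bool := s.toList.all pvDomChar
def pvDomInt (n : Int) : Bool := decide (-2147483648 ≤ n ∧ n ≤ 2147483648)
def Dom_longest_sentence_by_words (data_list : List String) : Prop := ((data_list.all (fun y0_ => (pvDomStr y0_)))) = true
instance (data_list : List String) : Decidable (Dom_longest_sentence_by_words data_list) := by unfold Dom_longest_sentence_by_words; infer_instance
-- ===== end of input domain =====

-- B computes the maximum word count once and collects matching lines in one pass, instead of
-- A's recomputation of max(dict_words, key=dict_words.get) inside the loop over all keys (faster).

-- len(line.split(" ")) — shared subexpression of both Pythons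
def pvWc (line : String) : Int := (((PySem.Str.split? line " ").getD []).length : Int)

-- ===== PORT A =====
-- dict_words[...] and dict_words.get(...) are ported as getD _ 0: A only looks up keys
-- that are present in dict_words, so the default is never read.
def longest_sentence_by_words (data_list : List String) : List (String × Int) :=
  let dict_words : PySem.Dict String Int :=
    data_list.foldl (fun d line => d.insert line (pvWc line)) PySem.Dict.empty
  let dict_result : PySem.Dict String Int :=
    dict_words.keys.foldl (fun r unit =>
      if dict_words.getD unit 0 =
          dict_words.getD ((PySem.List.max? dict_words.keys
            (fun k => dict_words.getD k 0)).getD "") 0 then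
        r.insert unit (dict_words.getD ((PySem.List.max? dict_words.keys
            (fun k => dict_words.getD k 0)).getD "") 0)
      else r) PySem.Dict.empty
  dict_result.items

-- ===== PORT B =====
def longest_sentence_by_words_alt (data_list : List String) : List (String × Int) :=
  match PySem.List.max? (data_list.map pvWc) (fun x => x) with
  | none => []
  | some m =>
    (data_list.foldl (fun r line => if pvWc line = m then r.insert line m else r)
      (PySem.Dict.empty : PySem.Dict String Int)).items

-- ===== PRECONDITION & SPEC =====
def Spec_longest_sentence_by_words (data_list : List String) (out : List (String × Int)) : Prop := out = longest_sentence_by_words_alt data_list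
instance (data_list : List String) (out : List (String × Int)) : Decidable (Spec_longest_sentence_by_words data_list out) := by unfold Spec_longest_sentence_by_words; infer_instance

-- ===== CLAIM (what is proved, stated in full; the proofs are below) =====
def Claim_equal_longest_sentence_by_words : Prop := ∀ (data_list : List String), Dom_longest_sentence_by_words data_list → Spec_longest_sentence_by_words data_list (longest_sentence_by_words data_list)

-- ===== LEMMAS AND PROOFS =====

-- a fold inserting (u, f u) answers lookups by f on the inserted keys
lemma pv_get?_foldl_insert (f : String → Int) (l : List String)
    (d : PySem.Dict String Int) (k : String) :
    (l.foldl (fun d u => d.insert u (f u)) d).get? k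
      = if k ∈ l then some (f k) else d.get? k := by
  induction l generalizing d with
  | nil => simp
  | cons x t ih =>
    simp only [List.foldl_cons, ih, List.mem_cons]
    by_cases h : k ∈ t
    · simp [h]
    · by_cases hx : k = x
      · simp [hx, PySem.Dict.get?_insert_self]
      · simp [h, hx, PySem.Dict.get?_insert_of_ne _ _ hx]

-- its items are the deduplicated keys paired with their f-values
lemma pv_items_foldl_insert (f : String → Int) (l : List String) :
    (l.foldl (fun d u => d.insert u (f u)) (PySem.Dict.empty : PySem.Dict String Int)).items
      = (PySem.Set.ofList l).map (fun u => (u, f u)) := by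
  induction l using List.reverseRecOn with
  | nil => rfl
  | append_singleton t x ih =>
    rw [List.foldl_append, List.foldl_cons, List.foldl_nil,
        PySem.Set.ofList_append_singleton]
    set D := t.foldl (fun d u => d.insert u (f u)) (PySem.Dict.empty : PySem.Dict String Int) with hD
    have hkeys : D.keys = PySem.Set.ofList t := by
      rw [hD, PySem.Dict.keys_foldl_insert]
      exact PySem.Set.update_nil_left t
    by_cases hx : x ∈ t
    · have hmem : x ∈ PySem.Set.ofList t := (PySem.Set.mem_ofList t x).2 hx
      have hc : D.contains x = true := by
        rw [PySem.Dict.contains_iff_mem_keys, hkeys]; exact hmem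
      rw [PySem.Dict.items_insert_of_contains _ _ hc, ih,
          PySem.Set.add_of_mem hmem, List.map_map]
      apply List.map_congr_left
      intro a ha
      by_cases hax : a = x <;> simp [hax]
    · have hmem : x ∉ PySem.Set.ofList t := fun h => hx ((PySem.Set.mem_ofList t x).1 h)
      have hc : D.contains x = false := by
        rw [← Bool.not_eq_true, PySem.Dict.contains_iff_mem_keys, hkeys]
        exact hmem
      rw [PySem.Dict.items_insert_of_not_contains _ _ hc, ih,
          PySem.Set.add_of_not_mem hmem, List.map_append]
      rfl
lemma pv_ofList_filter (q : String → Bool) (l : List String) :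
    PySem.Set.ofList (l.filter q) = (PySem.Set.ofList l).filter q := by
  induction l using List.reverseRecOn with
  | nil => rfl
  | append_singleton t x ih =>
    rw [List.filter_append, PySem.Set.ofList_append_singleton]
    by_cases hq : q x
    · simp only [List.filter_cons, hq, if_pos, List.filter_nil,
        PySem.Set.ofList_append_singleton, ih]
      by_cases hx : x ∈ t
      · rw [PySem.Set.add_of_mem ((PySem.Set.mem_ofList t x).2 hx),
            PySem.Set.add_of_mem (by
              simp [List.mem_filter, (PySem.Set.mem_ofList t x).2 hx, hq])]
      · rw [PySem.Set.add_of_not_mem (fun h => hx ((PySem.Set.mem_ofList t x).1 h)),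
            PySem.Set.add_of_not_mem (fun h => hx ((PySem.Set.mem_ofList t x).1 (List.mem_of_mem_filter h))),
            List.filter_append]
        simp [hq]
    · simp only [List.filter_cons, hq, Bool.false_eq_true, if_false, List.filter_nil,
        List.append_nil]
      by_cases hx : x ∈ t
      · rw [PySem.Set.add_of_mem ((PySem.Set.mem_ofList t x).2 hx)]; exact ih
      · rw [PySem.Set.add_of_not_mem (fun h => hx ((PySem.Set.mem_ofList t x).1 h)),
            List.filter_append]
        simp [hq, ih]

-- ===== VERDICT (by name: the statement is the Claim_ definition above) =====
theorem longest_sentence_by_words_spec : Claim_equal_longest_sentence_by_words := by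
  intro l _
  unfold Spec_longest_sentence_by_words
  cases hm : PySem.List.max? (l.map pvWc) (fun x => x) with
  | none =>
    have hl : l = [] := by
      have := (PySem.List.max?_eq_none_iff (l.map pvWc) (fun x => x)).1 hm
      simpa using this
    subst hl; rfl
  | some m =>
    simp only [longest_sentence_by_words, longest_sentence_by_words_alt, hm]
    set W := l.foldl (fun d line => d.insert line (pvWc line)) (PySem.Dict.empty : PySem.Dict String Int) with hW
    have hkeys : W.keys = PySem.Set.ofList l := by
      rw [hW, PySem.Dict.keys_foldl_insert]
      exact PySem.Set.update_nil_left l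
    have hget : ∀ k ∈ l, W.getD k 0 = pvWc k := by
      intro k hk
      rw [hW, PySem.Dict.getD_eq_get?_getD, pv_get?_foldl_insert]
      simp [hk]
    -- the argmax key and its value
    obtain ⟨y, hy, hym⟩ : ∃ y ∈ l.map pvWc, y = m :=
      ⟨m, PySem.List.max?_mem hm, rfl⟩
    cases ha : PySem.List.max? W.keys (fun k => W.getD k 0) with
    | none =>
      exfalso
      have : W.keys = [] := (PySem.List.max?_eq_none_iff _ _).1 ha
      obtain ⟨z, hz, _⟩ := List.mem_map.1 hy
      have : z ∈ W.keys := by rw [hkeys]; exact (PySem.Set.mem_ofList l z).2 hz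
      simp_all
    | some a =>
      have haml : a ∈ l := by
        have := PySem.List.max?_mem ha
        rw [hkeys] at this
        exact (PySem.Set.mem_ofList l a).1 this
      have hM : W.getD a 0 = m := by
        apply le_antisymm
        · rw [hget a haml]
          exact PySem.List.max?_isMax hm _ (List.mem_map_of_mem haml)
        · obtain ⟨z, hz, hzy⟩ := List.mem_map.1 hy
          have h1 : W.getD z 0 ≤ W.getD a 0 := by
            apply PySem.List.max?_isMax ha
            rw [hkeys]; exact (PySem.Set.mem_ofList l z).2 hz
          rw [hget z hz, hzy, hym] at h1
          exact h1
      simp only [Option.getD_some, hM]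
      rw [PySem.List.foldl_ite_eq_foldl_filter (fun unit => W.getD unit 0 = m)
            (fun (r : PySem.Dict String Int) u => r.insert u m),
          PySem.List.foldl_ite_eq_foldl_filter (fun line => pvWc line = m)
            (fun (r : PySem.Dict String Int) u => r.insert u m),
          pv_items_foldl_insert (fun _ => m), pv_items_foldl_insert (fun _ => m)]
      congr 1
      have hnd : (W.keys.filter (fun u => decide (W.getD u 0 = m))).Nodup := by
        rw [hkeys]; exact (PySem.Set.nodup_ofList l).filter _
      rw [PySem.Set.ofList_eq_self_of_nodup _ hnd, hkeys, pv_ofList_filter]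
      apply List.filter_congr
      intro u hu
      rw [hget u ((PySem.Set.mem_ofList l u).1 hu)]
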